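-- pv_equiv track=rewrite | github.com/su3ry/Resource_Allocation_Game | brute_force_eval.py | overlap_POI
-- ===== SOURCE A (Python) =====
-- def overlap_POI(row_actions, column_actions):
--     A = []
--     for i in range(len(row_actions)):
--         temp = []
--         for j in range(len(column_actions)):
--             intersection = [p for p in row_actions[i] if p in column_actions[j]]
--             temp.append(len(intersection))
--         A.append(temp)
--     return A
-- ===== SOURCE B (Python) =====
-- def overlap_POI(row_actions, column_actions):
--     # Inverted index: POI -> list of column indices whose column contains it (each column once)
--     index = {}
--     for j in range(len(column_actions)):
--         for p in set(column_actions[j]):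
--             index.setdefault(p, []).append(j)
--     result = []
--     for row in row_actions:
--         counts = {}
--         for p in row:
--             for j in index.get(p, []):
--                 counts[j] = counts.get(j, 0) + 1
--         result.append([counts.get(j, 0) for j in range(len(column_actions))])
--     return result
-- ===== Notes on version B (the rewrite author's own statement) =====
-- stated objective: faster
-- what changed: Replaces the nested row-by-column pairwise membership scan with an inverted index from each POI to the (deduplicated) column indices containing it, then fills each row by fanning out every row element through that index into a counter, removing the per-cell row-times-column scan.
import Mathlib
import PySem

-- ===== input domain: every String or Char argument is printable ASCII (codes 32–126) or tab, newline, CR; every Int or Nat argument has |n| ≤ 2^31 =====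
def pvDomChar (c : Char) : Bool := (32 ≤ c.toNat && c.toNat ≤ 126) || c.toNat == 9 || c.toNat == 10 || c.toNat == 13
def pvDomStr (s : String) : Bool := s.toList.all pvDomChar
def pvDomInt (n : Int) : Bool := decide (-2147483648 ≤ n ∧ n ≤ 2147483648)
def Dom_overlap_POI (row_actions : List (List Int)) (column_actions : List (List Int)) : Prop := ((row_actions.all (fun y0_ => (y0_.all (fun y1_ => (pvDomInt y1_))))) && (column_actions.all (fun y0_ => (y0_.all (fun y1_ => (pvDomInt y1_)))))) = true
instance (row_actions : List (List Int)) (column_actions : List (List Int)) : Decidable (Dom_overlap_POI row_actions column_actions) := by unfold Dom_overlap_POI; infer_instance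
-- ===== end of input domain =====

-- B replaces A's pairwise row-by-column intersection scans with an inverted index
-- (POI -> deduplicated column indices) plus a per-row counter fan-out; same values, different traversal.

-- ===== PORT A =====
def overlap_POI (row_actions : List (List Int)) (column_actions : List (List Int)) : List (List Int) :=
  (PySem.List.pyRange 0 (PySem.List.len row_actions)).foldl
    (fun A i =>
      A ++ [(PySem.List.pyRange 0 (PySem.List.len column_actions)).foldl
        (fun temp j =>
          temp ++ [(((PySem.List.pyGetD row_actions i []).filter
              (fun p => (PySem.List.pyGetD column_actions j []).contains p)).length : Int)])
        []])
    []

-- ===== PORT B =====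
-- index building: for j in range(len(column_actions)): for p in set(column_actions[j]): index.setdefault(p, []).append(j)
def pvIndexStep (column_actions : List (List Int)) (d : PySem.Dict Int (List Int)) (j : Int) : PySem.Dict Int (List Int) :=
  (PySem.Set.ofList (PySem.List.pyGetD column_actions j [])).foldl
    (fun d p => d.modify p [] (fun l => l ++ [j])) d

def pvIndex (column_actions : List (List Int)) : PySem.Dict Int (List Int) :=
  (PySem.List.pyRange 0 (PySem.List.len column_actions)).foldl (pvIndexStep column_actions) PySem.Dict.empty

-- one row: counts[j] = counts.get(j, 0) + 1 for each j in index.get(p, []), p over the row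
def pvRowCounts (idx : PySem.Dict Int (List Int)) (ncols : Int) (row : List Int) : List Int :=
  let c := row.foldl
    (fun c p => (idx.getD p []).foldl (fun c j => c.insert j (c.getD j 0 + 1)) c)
    PySem.Dict.empty
  (PySem.List.pyRange 0 ncols).map (fun j => c.getD j 0)

def overlap_POI_alt (row_actions : List (List Int)) (column_actions : List (List Int)) : List (List Int) :=
  let idx := pvIndex column_actions
  row_actions.foldl (fun res row => res ++ [pvRowCounts idx (PySem.List.len column_actions) row]) []

-- ===== PRECONDITION & SPEC =====
def Spec_overlap_POI (row_actions : List (List Int)) (column_actions : List (List Int)) (out : List (List Int)) : Prop := out = overlap_POI_alt row_actions column_actions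
instance (row_actions : List (List Int)) (column_actions : List (List Int)) (out : List (List Int)) : Decidable (Spec_overlap_POI row_actions column_actions out) := by unfold Spec_overlap_POI; infer_instance

-- ===== CLAIM (what is proved, stated in full; the proofs are below) =====
def Claim_equal_overlap_POI : Prop := ∀ (row_actions : List (List Int)) (column_actions : List (List Int)), Dom_overlap_POI row_actions column_actions → Spec_overlap_POI row_actions column_actions (overlap_POI row_actions column_actions)

-- ===== LEMMAS AND PROOFS =====

-- one column's pass over its deduplicated set appends j to exactly the keys in the set
theorem pv_getD_foldl_modify_append_set (s : List Int) (hs : s.Nodup)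
    (d : PySem.Dict Int (List Int)) (jv q : Int) :
    ((s.foldl (fun d p => d.modify p [] (fun l => l ++ [jv])) d).getD q [])
      = d.getD q [] ++ (if q ∈ s then [jv] else []) := by
  induction s generalizing d with
  | nil => simp
  | cons p t ih =>
    simp only [List.foldl_cons]
    rcases List.nodup_cons.mp hs with ⟨hp, hts⟩
    rw [ih hts]
    by_cases hq : q = p
    · subst hq
      simp [hp]
    · simp [PySem.Dict.getD_modify, hq, List.mem_cons]

-- the inverted index over the first n columns: each column index occurs once per contained POI
theorem pv_index_count (column_actions : List (List Int)) (n : Nat) (hn : n ≤ column_actions.length)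
    (q : Int) (jn : Nat) :
    (((PySem.List.pyRange 0 (n : Int)).foldl (pvIndexStep column_actions) PySem.Dict.empty).getD q []).count ((jn : Int))
      = if jn < n ∧ q ∈ column_actions.getD jn [] then 1 else 0 := by
  induction n with
  | zero => simp [PySem.List.pyRange]
  | succ m ih =>
    have hm : m ≤ column_actions.length := Nat.le_of_succ_le hn
    have hcast : ((m + 1 : Nat) : Int) = (m : Int) + 1 := by push_cast; ring
    rw [hcast, PySem.List.pyRange_one_succ_right (by positivity), List.foldl_append]
    simp only [List.foldl_cons, List.foldl_nil]
    rw [pvIndexStep, pv_getD_foldl_modify_append_set _ (PySem.Set.nodup_ofList _),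
        List.count_append, ih hm]
    rw [PySem.List.pyGetD_natCast]
    by_cases hmem : q ∈ column_actions.getD m []
    · simp only [PySem.Set.mem_ofList, hmem, if_true]
      by_cases hj : jn = m
      · subst hj
        rw [if_neg (fun h => Nat.lt_irrefl _ h.1), if_pos ⟨Nat.lt_succ_self _, hmem⟩]
        simp
      · have hne : ((jn : Int)) ≠ ((m : Int)) := by exact_mod_cast hj
        have hc : List.count ((jn : Int)) [((m : Int))] = 0 := by simp [Ne.symm hne]
        rw [hc, Nat.add_zero]
        have hiff : (jn < m ∧ q ∈ column_actions.getD jn []) ↔ (jn < m + 1 ∧ q ∈ column_actions.getD jn []) := by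
          constructor <;> rintro ⟨h1, h2⟩ <;> exact ⟨by omega, h2⟩
        rw [if_congr hiff rfl rfl]
    · simp only [PySem.Set.mem_ofList, hmem, if_false, List.count_nil, Nat.add_zero]
      by_cases hj : jn = m
      · subst hj
        rw [if_neg (fun h => hmem h.2), if_neg (fun h => hmem h.2)]
      · have hiff : (jn < m ∧ q ∈ column_actions.getD jn []) ↔ (jn < m + 1 ∧ q ∈ column_actions.getD jn []) := by
          constructor <;> rintro ⟨h1, h2⟩ <;> exact ⟨by omega, h2⟩
        rw [if_congr hiff rfl rfl]

-- the per-row counter: counts.get(v, 0) is the total multiplicity of v over the fanned-out index lists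
theorem pv_row_counter (idx : PySem.Dict Int (List Int)) (row : List Int)
    (c : PySem.Dict Int Int) (v : Int) :
    ((row.foldl (fun c p => (idx.getD p []).foldl (fun c j => c.insert j (c.getD j 0 + 1)) c) c).getD v 0)
      = c.getD v 0 + ((row.map (fun p => ((idx.getD p []).count v : Int))).sum) := by
  induction row generalizing c with
  | nil => simp
  | cons p t ih =>
    simp only [List.foldl_cons, List.map_cons, List.sum_cons]
    rw [ih, PySem.Dict.getD_foldl_insert_add_one]
    ring

-- one row of B equals one row of A
theorem pv_row_eq (column_actions : List (List Int)) (row : List Int) :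
    pvRowCounts (pvIndex column_actions) (PySem.List.len column_actions) row
      = (PySem.List.pyRange 0 (PySem.List.len column_actions)).map
          (fun j => (((row.filter (fun p => (PySem.List.pyGetD column_actions j []).contains p)).length : Int))) := by
  unfold pvRowCounts
  refine List.map_congr_left ?_
  intro j hj
  rcases PySem.List.mem_pyRange_one.mp hj with ⟨hj0, hjlt⟩
  obtain ⟨jn, rfl⟩ : ∃ jn : Nat, (jn : Int) = j := ⟨j.toNat, Int.toNat_of_nonneg hj0⟩
  have hjn : jn < column_actions.length := by
    have : (jn : Int) < (column_actions.length : Int) := by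
      simpa [PySem.List.len] using hjlt
    exact_mod_cast this
  rw [pv_row_counter]
  have hmap : (row.map (fun p => (((pvIndex column_actions).getD p []).count ((jn : Int)) : Int)))
      = row.map (fun p => if (PySem.List.pyGetD column_actions ((jn : Int)) []).contains p then (1 : Int) else 0) := by
    refine List.map_congr_left ?_
    intro p _
    rw [pvIndex, PySem.List.len, pv_index_count column_actions column_actions.length le_rfl p jn]
    by_cases hp : p ∈ PySem.List.pyGetD column_actions ((jn : Int)) []
    · simp only [PySem.List.pyGetD_natCast, List.getD_eq_getElem?_getD] at hp
      simp [hjn]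
    · simp only [PySem.List.pyGetD_natCast, List.getD_eq_getElem?_getD] at hp
      simp [hp]
  rw [hmap, PySem.List.sum_map_ite_one_zero, PySem.Dict.getD_empty,
      List.countP_eq_length_filter, zero_add]

-- ===== VERDICT (by name: the statement is the Claim_ definition above) =====
theorem overlap_POI_spec : Claim_equal_overlap_POI := by
  intro row_actions column_actions _
  unfold Spec_overlap_POI overlap_POI overlap_POI_alt
  rw [PySem.List.foldl_append_singleton_eq_map, PySem.List.foldl_append_singleton_eq_map,
      List.nil_append, List.nil_append]
  have hA : (PySem.List.pyRange 0 (PySem.List.len row_actions)).map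
      (fun i => (PySem.List.pyRange 0 (PySem.List.len column_actions)).foldl
        (fun temp j =>
          temp ++ [(((PySem.List.pyGetD row_actions i []).filter
              (fun p => (PySem.List.pyGetD column_actions j []).contains p)).length : Int)]) [])
      = ((PySem.List.pyRange 0 (PySem.List.len row_actions)).map
          (fun i => PySem.List.pyGetD row_actions i [])).map
        (fun row => (PySem.List.pyRange 0 (PySem.List.len column_actions)).map
          (fun j => ((row.filter (fun p => (PySem.List.pyGetD column_actions j []).contains p)).length : Int))) := by
    rw [List.map_map]
    refine List.map_congr_left ?_
    intro i _
    rw [PySem.List.foldl_append_singleton_eq_map, List.nil_append]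
    rfl
  rw [hA, PySem.List.map_pyGetD_pyRange_zero]
  refine List.map_congr_left ?_
  intro row _
  rw [pv_row_eq]
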